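-- pv_equiv track=rewrite | github.com/danagle/advent-of-code-python | 2021/15/solution.py | expand_grid
-- ===== SOURCE A (Python) =====
-- from typing import List, Tuple, Dict
--
-- def expand_grid(grid: List[List[int]], times: int = 5) -> List[List[int]]:
--     """
--     Expand the grid according to Part 2 rules: tile it times x times,
--     incrementing risk levels and wrapping at 9.
--     """
--     original_rows, original_cols = len(grid), len(grid[0])
--     new_rows, new_cols = original_rows * times, original_cols * times
--     expanded: List[List[int]] = [[0] * new_cols for _ in range(new_rows)]
--
--     for i in range(new_rows):
--         for j in range(new_cols):
--             add_risk = i // original_rows + j // original_cols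
--             expanded[i][j] = (grid[i % original_rows][j % original_cols] + add_risk - 1) % 9 + 1
--
--     return expanded
-- ===== SOURCE B (Python) =====
-- def expand_grid(grid, times=5):
--     """Tile the grid times x times by bump-propagation: normalize each value
--     into 1..9, then derive each successive tile copy from the previous one
--     with a single wrap-increment, instead of computing i//rows + j//cols per cell."""
--     def bump(row):
--         return [v % 9 + 1 for v in row]
--
--     strip = []
--     for row in grid:
--         r = [(v - 1) % 9 + 1 for v in row]
--         acc = []
--         for _ in range(times):
--             acc += r
--             r = bump(r)
--         strip.append(acc)
--
--     out = []
--     tile = strip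
--     for _ in range(times):
--         out += tile
--         tile = [bump(r) for r in tile]
--     return out
-- ===== Notes on version B (the rewrite author's own statement) =====
-- stated objective: alternative
-- what changed: B builds the tiling by bump-propagation: it normalizes each value into 1..9, concatenates times horizontal copies of each row where each copy is the previous copy wrap-incremented, then stacks times copies of that strip, each copy the previous one with every row wrap-incremented; this replaces A's per-cell i//rows + j//cols index arithmetic in a doubly nested loop with whole-list concatenation and single-pass comprehensions.
-- outside the precondition, e.g. on expand_grid([[1], [2, 3]], 1): A returns [[1], [2]], B returns [[1], [2, 3]]
import Mathlib
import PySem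

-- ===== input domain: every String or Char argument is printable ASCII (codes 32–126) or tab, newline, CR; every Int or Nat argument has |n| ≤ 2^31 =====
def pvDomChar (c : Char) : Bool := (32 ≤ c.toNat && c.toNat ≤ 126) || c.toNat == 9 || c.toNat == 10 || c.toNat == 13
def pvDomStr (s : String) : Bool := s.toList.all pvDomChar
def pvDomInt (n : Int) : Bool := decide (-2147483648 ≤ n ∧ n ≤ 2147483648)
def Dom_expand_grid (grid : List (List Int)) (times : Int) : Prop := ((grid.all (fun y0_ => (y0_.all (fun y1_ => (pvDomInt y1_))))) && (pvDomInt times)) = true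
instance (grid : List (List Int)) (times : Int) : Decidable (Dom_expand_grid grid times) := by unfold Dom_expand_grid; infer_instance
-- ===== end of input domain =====

-- B tiles the grid by bump-propagation (each tile copy derived from the previous by one wrap-increment,
-- via whole-list concatenation) instead of A's per-cell i//rows + j//cols arithmetic in a doubly
-- nested loop; objective: an alternative decomposition of the same cost.

-- ===== PORT A =====
def expand_grid (grid : List (List Int)) (times : Int) : List (List Int) :=
  let original_rows : Int := PySem.List.len grid
  let original_cols : Int := PySem.List.len (PySem.List.pyGetD grid 0 [])  -- len(grid[0]); IndexError on [] is outside Pre_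
  let new_rows := original_rows * times
  let new_cols := original_cols * times
  let expanded := (PySem.List.pyRange 0 new_rows 1).map (fun _ => List.replicate new_cols.toNat (0 : Int))
  (PySem.List.pyRange 0 new_rows 1).foldl (fun exp i =>
    (PySem.List.pyRange 0 new_cols 1).foldl (fun exp j =>
      let add_risk := PySem.Int.floordiv i original_rows + PySem.Int.floordiv j original_cols
      -- grid[i % rows][j % cols]: IndexError on ragged rows is outside Pre_
      let v := PySem.List.pyGetD (PySem.List.pyGetD grid (PySem.Int.mod i original_rows) [])
                 (PySem.Int.mod j original_cols) 0
      exp.modify i.toNat (fun row => row.set j.toNat (PySem.Int.mod (v + add_risk - 1) 9 + 1))) exp)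
    expanded

-- ===== PORT B =====
def pvBump (v : Int) : Int := PySem.Int.mod v 9 + 1

def pvBumpRow (r : List Int) : List Int := r.map pvBump

def expand_grid_alt (grid : List (List Int)) (times : Int) : List (List Int) :=
  let strip := grid.map (fun row =>
    let r0 := row.map (fun v => PySem.Int.mod (v - 1) 9 + 1)
    ((PySem.List.pyRange 0 times 1).foldl
      (fun (st : List Int × List Int) _ => (st.1 ++ st.2, pvBumpRow st.2)) ([], r0)).1)
  ((PySem.List.pyRange 0 times 1).foldl
    (fun (st : List (List Int) × List (List Int)) _ => (st.1 ++ st.2, st.2.map pvBumpRow))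
    ([], strip)).1

-- ===== PRECONDITION & SPEC =====
-- Pre_ excludes the empty grid (A raises IndexError on len(grid[0])) and, when times ≥ 1, non-rectangular
-- grids: there A raises on rows shorter than the first row and silently truncates rows longer than the
-- first row (an artefact of reading only len(grid[0])), while B uses each row in full.
def Pre_expand_grid (grid : List (List Int)) (times : Int) : Prop :=
  grid ≠ [] ∧ (times ≤ 0 ∨ ∀ row ∈ grid, row.length = (grid.headD []).length)
instance (grid : List (List Int)) (times : Int) : Decidable (Pre_expand_grid grid times) := by
  unfold Pre_expand_grid; infer_instance

def pvWitness_expand_grid : List (List Int) × Int := ([[1, 2], [8, 9]], 2)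

def Spec_expand_grid (grid : List (List Int)) (times : Int) (out : List (List Int)) : Prop :=
  out = expand_grid_alt grid times
instance (grid : List (List Int)) (times : Int) (out : List (List Int)) : Decidable (Spec_expand_grid grid times out) := by
  unfold Spec_expand_grid; infer_instance

-- ===== CLAIM (what is proved, stated in full; the proofs are below) =====
def Claim_equal_expand_grid : Prop := ∀ (grid : List (List Int)) (times : Int), Dom_expand_grid grid times → Pre_expand_grid grid times → Spec_expand_grid grid times (expand_grid grid times)


-- ===== LEMMAS AND PROOFS =====

-- the common closed form both ports are reduced to
def pvTile (grid : List (List Int)) (t : Nat) : List (List Int) :=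
  (List.range t).flatMap (fun ti => grid.map (fun row =>
    (List.range t).flatMap (fun tj =>
      row.map (fun v => PySem.Int.mod (v + (↑ti + ↑tj) - 1) 9 + 1))))

theorem bump_iter (k : Nat) (v : Int) :
    pvBump^[k] (PySem.Int.mod (v - 1) 9 + 1) = PySem.Int.mod (v + ↑k - 1) 9 + 1 := by
  induction k with
  | zero => simp
  | succ k ih =>
      rw [Function.iterate_succ_apply', ih]
      unfold pvBump
      simp only [PySem.Int.mod_eq_emod_of_pos (show (0:Int) < 9 by norm_num)]
      push_cast
      omega

theorem map_iterate {α : Type} (f : α → α) (k : Nat) (l : List α) :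
    (List.map f)^[k] l = l.map f^[k] := by
  induction k generalizing l with
  | zero => simp
  | succ k ih =>
      rw [Function.iterate_succ_apply, ih, List.map_map]
      exact List.map_congr_left (fun a _ => (Function.iterate_succ_apply f k a).symm)

theorem foldl_pair {α : Type} (l : List Int) (acc cur : List α) (g : List α → List α) :
    l.foldl (fun (st : List α × List α) _ => (st.1 ++ st.2, g st.2)) (acc, cur)
      = (acc ++ (List.range l.length).flatMap (fun k => g^[k] cur), g^[l.length] cur) := by
  induction l generalizing acc cur with
  | nil => simp
  | cons x t ih =>
      rw [List.foldl_cons, ih]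
      have h1 : (List.range (x :: t).length).flatMap (fun k => g^[k] cur)
          = cur ++ (List.range t.length).flatMap (fun k => g^[k] (g cur)) := by
        rw [List.length_cons, List.range_succ_eq_map, List.flatMap_cons, List.flatMap_map]
        simp only [Function.iterate_zero_apply]
        congr 1
      have h2 : g^[(x :: t).length] cur = g^[t.length] (g cur) := by
        rw [List.length_cons, Function.iterate_succ_apply]
      rw [h1, h2, ← List.append_assoc]

theorem modify_append_len {α : Type} (f : α → α) :
    ∀ (l r : List α), (l ++ r).modify l.length f = l ++ r.modify 0 f := by
  intro l
  induction l with
  | nil => simp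
  | cons x t ih =>
      intro r
      rw [List.cons_append, List.length_cons, List.modify_succ_cons, ih]
      rfl

theorem foldl_range_modify {α : Type} (d : α) :
    ∀ (m : Nat) (e : List α) (F : Nat → α → α), m ≤ e.length →
      (List.range m).foldl (fun e i => e.modify i (F i)) e
        = (List.range m).map (fun i => F i (e.getD i d)) ++ e.drop m := by
  intro m
  induction m with
  | zero => simp
  | succ m ih =>
      intro e F h
      rw [List.range_succ, List.foldl_append, ih e F (by omega)]
      have hm : m < e.length := by omega
      have hd : e.drop m = e[m] :: e.drop (m + 1) := List.drop_eq_getElem_cons hm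
      have hlen : ((List.range m).map (fun i => F i (e.getD i d))).length = m := by simp
      rw [List.foldl_cons, List.foldl_nil, hd]
      have hmod := modify_append_len (F m) ((List.range m).map (fun i => F i (e.getD i d)))
          (e[m] :: e.drop (m + 1))
      rw [hlen] at hmod
      rw [hmod, List.modify_zero_cons]
      simp [List.getElem?_eq_getElem hm]

theorem foldl_range_set {α : Type} (d : α) (m : Nat) (r : List α) (g : Nat → α) (h : m ≤ r.length) :
    (List.range m).foldl (fun r j => r.set j (g j)) r = (List.range m).map g ++ r.drop m := by
  have := foldl_range_modify d m r (fun j _ => g j) h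
  simp only [List.set_eq_modify] at *
  exact this

theorem range_mul_map {β : Type} (R : Nat) (t : Nat) (f : Nat → β) :
    (List.range (R * t)).map f
      = (List.range t).flatMap (fun ti => (List.range R).map (fun a => f (R * ti + a))) := by
  induction t with
  | zero => simp
  | succ t ih =>
      rw [Nat.mul_succ, List.range_add, List.map_append, ih, List.range_succ,
          List.flatMap_append, List.flatMap_singleton, List.map_map]
      rfl

theorem getD_row {α β : Type} (row : List α) (g : α → β) (d : α) :
    (List.range row.length).map (fun b => g (row.getD b d)) = row.map g := by
  induction row with
  | nil => simp
  | cons x t ih =>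
      rw [List.length_cons, List.range_succ_eq_map, List.map_cons, List.map_map]
      simp only [List.getD_cons_zero, Function.comp_def, List.getD_cons_succ]
      rw [List.map_cons]
      exact congrArg (List.cons (g x)) ih

theorem bumpRow_iter (k : Nat) (l : List Int) : pvBumpRow^[k] l = l.map pvBump^[k] := by
  have h : pvBumpRow = List.map pvBump := funext fun r => rfl
  rw [h, map_iterate]

theorem alt_eq_tile (grid : List (List Int)) (times : Int) :
    expand_grid_alt grid times = pvTile grid times.toNat := by
  unfold expand_grid_alt pvTile
  dsimp only
  have hlen : (PySem.List.pyRange 0 times 1).length = times.toNat := by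
    rw [PySem.List.length_pyRange_one]; simp
  rw [foldl_pair, hlen]
  simp only [List.nil_append]
  refine List.flatMap_congr (fun ti _ => ?_)
  rw [map_iterate, List.map_map]
  refine List.map_congr_left (fun row _ => ?_)
  simp only [Function.comp_apply]
  rw [foldl_pair, hlen]
  simp only [List.nil_append]
  rw [bumpRow_iter, List.map_flatMap]
  refine List.flatMap_congr (fun tj _ => ?_)
  rw [bumpRow_iter, List.map_map, List.map_map]
  refine List.map_congr_left (fun v _ => ?_)
  simp only [Function.comp_apply]
  rw [← Function.iterate_add_apply, bump_iter]
  congr 1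

theorem modify_modify {α : Type} (e : List α) (i : Nat) (f g : α → α) :
    (e.modify i f).modify i g = e.modify i (fun x => g (f x)) := by
  induction e generalizing i with
  | nil => simp
  | cons x t ih => cases i <;> simp [ih]

theorem modify_id {α : Type} (e : List α) (i : Nat) : e.modify i (fun x => x) = e := by
  induction e generalizing i with
  | nil => simp
  | cons x t ih => cases i <;> simp [ih]

theorem foldl_modify_comm {α β : Type} (i : Nat) (l : List β) (e : List α) (h : β → α → α) :
    l.foldl (fun e j => e.modify i (h j)) e
      = e.modify i (fun row => l.foldl (fun row j => h j row) row) := by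
  induction l generalizing e with
  | nil => simp [modify_id]
  | cons j l ih =>
      rw [List.foldl_cons, ih, modify_modify]
      rfl

theorem foldl2d {α : Type} (d : α) (n m : Nat) (z : List α) (hz : z.length = m) (g : Nat → Nat → α) :
    (List.range n).foldl (fun e i =>
        (List.range m).foldl (fun e j => e.modify i (fun row => row.set j (g i j))) e)
      (List.replicate n z)
      = (List.range n).map (fun i => (List.range m).map (g i)) := by
  have hb : ∀ (e : List (List α)) (i : Nat),
      (List.range m).foldl (fun e j => e.modify i (fun row => row.set j (g i j))) e
        = e.modify i (fun row => (List.range m).foldl (fun row j => row.set j (g i j)) row) :=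
    fun e i => foldl_modify_comm i (List.range m) e (fun j row => row.set j (g i j))
  simp only [hb]
  rw [foldl_range_modify [] n (List.replicate n z) _ (by simp)]
  simp only [List.drop_replicate, Nat.sub_self, List.replicate_zero, List.append_nil]
  refine List.map_congr_left (fun i hi => ?_)
  rw [List.getD_replicate z (List.mem_range.mp hi)]
  rw [foldl_range_set d m z (g i) (le_of_eq hz.symm)]
  simp [hz]

theorem a_eq_tile (grid : List (List Int)) (times : Int) (hne : grid ≠ [])
    (hpos : 0 < times)
    (hrect : ∀ row ∈ grid, row.length = (grid.headD []).length) :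
    expand_grid grid times = pvTile grid times.toNat := by
  obtain ⟨t, ht⟩ : ∃ t : Nat, times = (t : Int) :=
    ⟨times.toNat, (Int.toNat_of_nonneg hpos.le).symm⟩
  subst ht
  rw [Int.toNat_natCast]
  have hR0 : 0 < grid.length := List.length_pos_iff.mpr hne
  unfold expand_grid
  dsimp only
  have hg0 : PySem.List.pyGetD grid 0 [] = grid.headD [] := by
    rw [PySem.List.pyGetD_zero]; cases grid <;> simp
  rw [hg0]
  simp only [PySem.List.len_eq]
  have hcast1 : (grid.length : Int) * (t : Int) = ((grid.length * t : Nat) : Int) := by push_cast; ring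
  have hcast2 : ((grid.headD []).length : Int) * (t : Int)
      = (((grid.headD []).length * t : Nat) : Int) := by push_cast; ring
  rw [hcast1, hcast2, PySem.List.pyRange_zero_natCast, PySem.List.pyRange_zero_natCast,
    Int.toNat_natCast]
  rw [List.foldl_map]
  simp only [List.foldl_map, Int.toNat_natCast, List.map_map]
  rw [show (List.map ((fun x => List.replicate ((grid.headD []).length * t) (0:Int)) ∘ (fun k : Nat => (k : Int))) (List.range (grid.length * t)))
        = List.replicate (grid.length * t) (List.replicate ((grid.headD []).length * t) (0:Int))
      from by simp [Function.comp_def, List.map_const']]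
  rw [foldl2d (0:Int) (grid.length * t) ((grid.headD []).length * t) _ (by simp)
      (fun i j => PySem.Int.mod (PySem.List.pyGetD (PySem.List.pyGetD grid (PySem.Int.mod (i : Int) (grid.length : Int)) []) (PySem.Int.mod (j : Int) ((grid.headD []).length : Int)) 0 + (PySem.Int.floordiv (i : Int) (grid.length : Int) + PySem.Int.floordiv (j : Int) ((grid.headD []).length : Int)) - 1) 9 + 1)]
  unfold pvTile
  rw [range_mul_map grid.length t]
  refine List.flatMap_congr (fun ti hti => ?_)
  have hg := getD_row grid (fun row => (List.range t).flatMap (fun tj : Nat =>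
        row.map (fun v => PySem.Int.mod (v + ((ti : Int) + (tj : Int)) - 1) 9 + 1))) []
  rw [← hg]
  refine List.map_congr_left (fun a ha => ?_)
  have ha' : a < grid.length := List.mem_range.mp ha
  have hidx : grid.length * ti + a < grid.length * t := by
    have := List.mem_range.mp hti
    calc grid.length * ti + a < grid.length * ti + grid.length := by omega
    _ = grid.length * (ti + 1) := by ring
    _ ≤ grid.length * t := Nat.mul_le_mul_left _ (by omega)
  have hmodR : PySem.Int.mod ((grid.length * ti + a : Nat) : Int) (grid.length : Int) = (a : Int) := by
    rw [PySem.Int.mod_natCast, Nat.mul_add_mod, Nat.mod_eq_of_lt ha']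
  have hdivR : PySem.Int.floordiv ((grid.length * ti + a : Nat) : Int) (grid.length : Int) = (ti : Int) := by
    rw [PySem.Int.floordiv_natCast, Nat.mul_add_div hR0, Nat.div_eq_of_lt ha', Nat.add_zero]
  rw [hmodR, hdivR, PySem.List.pyGetD_natCast]
  have hrow : (grid.getD a []).length = (grid.headD []).length := by
    rw [List.getD_eq_getElem grid [] ha']
    exact hrect _ (List.getElem_mem ha')
  rw [← hrow]
  rw [range_mul_map (grid.getD a []).length t]
  refine List.flatMap_congr (fun tj htj => ?_)
  have hg2 := getD_row (grid.getD a []) (fun v => PySem.Int.mod (v + ((ti : Int) + (tj : Int)) - 1) 9 + 1) 0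
  rw [← hg2]
  refine List.map_congr_left (fun b hb => ?_)
  have hb' : b < (grid.getD a []).length := List.mem_range.mp hb
  have hC0 : 0 < (grid.getD a []).length := by omega
  have hmodC : PySem.Int.mod (((grid.getD a []).length * tj + b : Nat) : Int) ((grid.getD a []).length : Int) = (b : Int) := by
    rw [PySem.Int.mod_natCast, Nat.mul_add_mod, Nat.mod_eq_of_lt hb']
  have hdivC : PySem.Int.floordiv (((grid.getD a []).length * tj + b : Nat) : Int) ((grid.getD a []).length : Int) = (tj : Int) := by
    rw [PySem.Int.floordiv_natCast, Nat.mul_add_div hC0, Nat.div_eq_of_lt hb', Nat.add_zero]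
  rw [hmodC, hdivC, PySem.List.pyGetD_natCast]

theorem a_nil_of_nonpos (grid : List (List Int)) (times : Int) (h : times ≤ 0) :
    expand_grid grid times = [] := by
  unfold expand_grid
  have h1 : (grid.length : Int) * times ≤ 0 := by
    have := Int.natCast_nonneg grid.length
    nlinarith
  simp [PySem.List.pyRange_one_eq_nil h1]

-- ===== VERDICT (by name: the statement is the Claim_ definition above) =====
theorem expand_grid_spec : Claim_equal_expand_grid := by
  intro grid times _ hpre
  unfold Spec_expand_grid
  obtain ⟨hne, hor⟩ := hpre
  rcases le_or_gt times 0 with hle | hpos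
  · rw [a_nil_of_nonpos grid times hle, alt_eq_tile]
    have : times.toNat = 0 := by omega
    simp [pvTile, this]
  · rcases hor with hle | hrect
    · omega
    · rw [a_eq_tile grid times hne hpos hrect, alt_eq_tile]
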